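-- pv_equiv track=rewrite | github.com/tvme/scraping_ez | 1/data_gathering/parsers/parse_data.py | mark_sources
-- ===== SOURCE A (Python) =====
-- def mark_sources(s_list):
--     # mark sources for indexing use
--     mhl_list = ['Mean', 'High', 'Low']
--     base_str = s_list[0]
--     list_out = [s_list[0]]
--     for s in s_list[1:]:
--         if s in mhl_list:
--             list_out.append(base_str[0] + '_' + s.lower())
--         else:
--             base_str = s
--             list_out.append(s)
--     return list_out
-- ===== SOURCE B (Python) =====
-- def mark_sources(s_list):
--     # mark sources for indexing use: two-pointer segment scan — j races ahead of i
--     # over each maximal run of label tokens, the run is marked in one batch against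
--     # the current base, and the element at j (if any) becomes the next base.
--     labels = ('Mean', 'High', 'Low')
--     n = len(s_list)
--     base = s_list[0]
--     out = [base]
--     i = 1
--     while i < n:
--         j = i
--         while j < n and s_list[j] in labels:
--             j += 1
--         out += [base[0] + '_' + s.lower() for s in s_list[i:j]]
--         if j < n:
--             base = s_list[j]
--             out.append(base)
--         i = j + 1
--     return out
-- ===== Notes on version B (the rewrite author's own statement) =====
-- stated objective: alternative
-- what changed: Replaced A's per-element stateful loop (mutable base_str, one append per element) by a two-pointer segment scan: an inner pointer finds each maximal run of label tokens, the whole run is marked in one batch comprehension against the current base, and the element after the run becomes the next base.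
import Mathlib
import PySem

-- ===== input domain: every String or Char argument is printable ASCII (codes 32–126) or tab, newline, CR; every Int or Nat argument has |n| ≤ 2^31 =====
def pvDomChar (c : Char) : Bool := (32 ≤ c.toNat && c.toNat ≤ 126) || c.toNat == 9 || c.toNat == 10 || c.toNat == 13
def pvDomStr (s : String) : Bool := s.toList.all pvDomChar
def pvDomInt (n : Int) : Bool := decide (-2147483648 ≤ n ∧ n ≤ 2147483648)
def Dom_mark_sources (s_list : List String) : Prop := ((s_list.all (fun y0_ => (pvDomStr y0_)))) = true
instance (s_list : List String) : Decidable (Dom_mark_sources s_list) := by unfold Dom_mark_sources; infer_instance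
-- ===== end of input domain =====

-- B replaces A's per-element stateful loop by a two-pointer segment scan (an inner pointer
-- finds each maximal run of labels, marked in one batch); RETURN-value equivalence on Pre_.

-- mhl_list = ['Mean', 'High', 'Low']
def pvLabels : List String := ["Mean", "High", "Low"]

-- base_str[0] + '_' + s.lower()  (IndexError on empty base_str is excluded by Pre_)
def pvMark (base s : String) : String :=
  ((PySem.Str.pyGet? base 0).map String.singleton).getD "" ++ "_" ++ PySem.Str.lower s

-- ===== PORT A =====
-- for-loop over s_list[1:] with state (base_str, list_out); list_out.append = ++ [·]
def mark_sources (s_list : List String) : List String :=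
  match s_list with
  | [] => []  -- s_list[0] raises IndexError; excluded by Pre_
  | b0 :: rest =>
    (rest.foldl
      (fun (st : String × List String) s =>
        if s ∈ pvLabels then (st.1, st.2 ++ [pvMark st.1 s])
        else (s, st.2 ++ [s]))
      (b0, [b0])).2

-- ===== PORT B =====
-- inner while: j += 1 while j < n and s_list[j] in labels
def pvScanRun (s_list : List String) (j : Nat) : Nat :=
  if h : j < s_list.length ∧ (s_list.getD j "") ∈ pvLabels then pvScanRun s_list (j + 1)
  else j
termination_by s_list.length - j

-- the inner pointer never moves backwards (cited by pvLoop's termination proof)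
theorem pvScanRun_ge (s_list : List String) (j : Nat) : j ≤ pvScanRun s_list j := by
  rw [pvScanRun]
  split
  · exact le_trans (Nat.le_succ j) (pvScanRun_ge s_list (j + 1))
  · exact le_refl j
termination_by s_list.length - j

-- outer while over i with state (base, out); s_list[i:j] ported as (drop i).take (j - i)
def pvLoop (s_list : List String) (base : String) (out : List String) (i : Nat) : List String :=
  if i < s_list.length then
    let out2 := out ++ ((s_list.drop i).take (pvScanRun s_list i - i)).map
      (fun s => pvMark base s)
    if pvScanRun s_list i < s_list.length then
      pvLoop s_list (s_list.getD (pvScanRun s_list i) "")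
        (out2 ++ [s_list.getD (pvScanRun s_list i) ""]) (pvScanRun s_list i + 1)
    else
      pvLoop s_list base out2 (pvScanRun s_list i + 1)
  else out
termination_by s_list.length + 1 - i
decreasing_by
  · have := pvScanRun_ge s_list i; omega
  · have := pvScanRun_ge s_list i; omega

-- n = len(s_list); base = s_list[0]; out = [base]; i = 1; while …; return out
def mark_sources_alt (s_list : List String) : List String :=
  match s_list with
  | [] => []  -- s_list[0] raises IndexError; excluded by Pre_
  | b0 :: _ => pvLoop s_list b0 [b0] 1

-- ===== PRECONDITION & SPEC =====
-- Pre_ holds exactly where the Python A returns: the list is nonempty and no label position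
-- has an empty effective base (an empty element followed, through labels only, by a label
-- makes base_str[0] raise IndexError).
def Pre_mark_sources (s_list : List String) : Prop :=
  s_list ≠ [] ∧
  ((List.range s_list.length).all (fun i =>
    !(decide (s_list.getD i "" ∈ pvLabels)) ||
    (List.range i).all (fun j =>
      !(decide (s_list.getD j "" = "")) ||
      (List.range i).any (fun k =>
        decide (j < k) && !(decide (s_list.getD k "" ∈ pvLabels)) &&
        !(decide (s_list.getD k "" = "")))))) = true
instance (s_list : List String) : Decidable (Pre_mark_sources s_list) := by
  unfold Pre_mark_sources; infer_instance

def pvWitness_mark_sources : List String := ["temp", "Mean", "High", "hum", "Low"]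

def Spec_mark_sources (s_list : List String) (out : List String) : Prop := out = mark_sources_alt s_list
instance (s_list : List String) (out : List String) : Decidable (Spec_mark_sources s_list out) := by unfold Spec_mark_sources; infer_instance

-- ===== CLAIM (what is proved, stated in full; the proofs are below) =====
def Claim_equal_mark_sources : Prop := ∀ (s_list : List String), Dom_mark_sources s_list → Pre_mark_sources s_list → Spec_mark_sources s_list (mark_sources s_list)

-- ===== LEMMAS AND PROOFS =====

-- the common recursive description of the marking: fused single-step recursion
def pvG (b : String) : List String → List String
  | [] => []
  | s :: t => if s ∈ pvLabels then pvMark b s :: pvG b t else s :: pvG s t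

-- A's fold with running base b and accumulated output acc produces acc ++ pvG b t
theorem pv_fold_eq_g (t : List String) (b : String) (acc : List String) :
    (t.foldl
      (fun (st : String × List String) s =>
        if s ∈ pvLabels then (st.1, st.2 ++ [pvMark st.1 s])
        else (s, st.2 ++ [s]))
      (b, acc)).2 = acc ++ pvG b t := by
  induction t generalizing b acc with
  | nil => simp [pvG]
  | cons s t' ih =>
    by_cases hs : s ∈ pvLabels <;>
      simp [List.foldl_cons, pvG, hs, ih, List.append_assoc]

def pvP : String → Bool := fun s => decide (s ∈ pvLabels)

-- pvG in segment form: the maximal label run marked in one batch, then the next base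
theorem pvG_seg (l : List String) (b : String) :
    pvG b l = (l.takeWhile pvP).map (fun s => pvMark b s) ++
      (match l.dropWhile pvP with
       | [] => []
       | r :: rs => r :: pvG r rs) := by
  induction l generalizing b with
  | nil => simp [pvG]
  | cons s t ih =>
    by_cases hs : s ∈ pvLabels
    · simp [pvG, pvP, hs, ih]
    · simp [pvG, pvP, hs]

-- take (takeWhile).length = takeWhile ; dropWhile = drop (takeWhile).length
theorem pv_take_takeWhile {α : Type} (p : α → Bool) (l : List α) :
    l.take (l.takeWhile p).length = l.takeWhile p := by
  induction l with
  | nil => rfl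
  | cons x t ih =>
    by_cases h : p x <;> simp [h, ih]

theorem pv_dropWhile_eq_drop {α : Type} (p : α → Bool) (l : List α) :
    l.dropWhile p = l.drop (l.takeWhile p).length := by
  induction l with
  | nil => rfl
  | cons x t ih =>
    by_cases h : p x <;> simp [h, ih]

theorem pv_takeWhile_len_le {α : Type} (p : α → Bool) (l : List α) :
    (l.takeWhile p).length ≤ l.length := by
  induction l with
  | nil => simp
  | cons x t ih =>
    by_cases h : p x <;> simp [h] <;> omega

-- the inner pointer stops exactly past the maximal label run starting at i
theorem pvScanRun_eq (s_list : List String) (i : Nat) :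
    pvScanRun s_list i = i + ((s_list.drop i).takeWhile pvP).length := by
  rw [pvScanRun]
  split
  · rename_i h
    obtain ⟨hi, hl⟩ := h
    have hdrop : s_list.drop i = s_list[i] :: s_list.drop (i + 1) :=
      List.drop_eq_getElem_cons hi
    have hget : s_list.getD i "" = s_list[i] := List.getD_eq_getElem s_list "" hi
    rw [pvScanRun_eq s_list (i + 1), hdrop, List.takeWhile_cons]
    have hp : pvP s_list[i] = true := by
      simp only [pvP, decide_eq_true_eq]; exact hget ▸ hl
    simp [hp]; omega
  · rename_i h
    by_cases hi : i < s_list.length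
    · have hl : ¬ s_list.getD i "" ∈ pvLabels := fun hl => h ⟨hi, hl⟩
      have hdrop : s_list.drop i = s_list[i] :: s_list.drop (i + 1) :=
        List.drop_eq_getElem_cons hi
      have hget : s_list.getD i "" = s_list[i] := List.getD_eq_getElem s_list "" hi
      rw [hdrop, List.takeWhile_cons]
      have hp : pvP s_list[i] = false := by
        simp only [pvP, decide_eq_false_iff_not]
        exact fun hx => hl (by rw [hget]; exact hx)
      simp [hp]
    · have : s_list.drop i = [] := List.drop_eq_nil_of_le (by omega)
      simp [this]
termination_by s_list.length - i

-- the outer loop computes out ++ pvG base (s_list.drop i)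
theorem pvLoop_eq (s_list : List String) (k i : Nat) (hk : s_list.length + 1 - i ≤ k)
    (base : String) (out : List String) :
    pvLoop s_list base out i = out ++ pvG base (s_list.drop i) := by
  induction k generalizing i base out with
  | zero =>
    have hi : ¬ i < s_list.length := by omega
    rw [pvLoop]
    simp [hi, List.drop_eq_nil_of_le (by omega : s_list.length ≤ i), pvG]
  | succ k ih =>
    rw [pvLoop]
    by_cases hi : i < s_list.length
    · have hrun := pvScanRun_eq s_list i
      have hge := pvScanRun_ge s_list i
      have hlen : ((s_list.drop i).takeWhile pvP).length ≤ (s_list.drop i).length :=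
        pv_takeWhile_len_le pvP (s_list.drop i)
      have hle : pvScanRun s_list i ≤ s_list.length := by
        rw [hrun]; simp [List.length_drop] at hlen ⊢; omega
      have htake : (s_list.drop i).take (pvScanRun s_list i - i) = (s_list.drop i).takeWhile pvP := by
        rw [hrun, Nat.add_sub_cancel_left, pv_take_takeWhile]
      have hdw : (s_list.drop i).dropWhile pvP = s_list.drop (pvScanRun s_list i) := by
        rw [pv_dropWhile_eq_drop, List.drop_drop, hrun, Nat.add_comm]
      by_cases hj : pvScanRun s_list i < s_list.length
      · have hdropj : s_list.drop (pvScanRun s_list i) =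
            s_list[pvScanRun s_list i] :: s_list.drop (pvScanRun s_list i + 1) :=
          List.drop_eq_getElem_cons hj
        have hget : s_list.getD (pvScanRun s_list i) "" = s_list[pvScanRun s_list i] :=
          List.getD_eq_getElem s_list "" hj
        simp only [hi, if_true, hj, if_true]
        rw [ih (pvScanRun s_list i + 1) (by omega)]
        rw [pvG_seg (s_list.drop i) base, htake, hdw, hdropj, hget]
        simp [List.append_assoc]
      · simp only [hi, if_true, hj, if_false]
        rw [ih (pvScanRun s_list i + 1) (by omega)]
        have hnil : s_list.drop (pvScanRun s_list i + 1) = [] :=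
          List.drop_eq_nil_of_le (by omega)
        rw [hnil, pvG_seg (s_list.drop i) base, htake, hdw,
          List.drop_eq_nil_of_le (by omega : s_list.length ≤ pvScanRun s_list i)]
        simp [pvG]
    · simp [hi, List.drop_eq_nil_of_le (by omega : s_list.length ≤ i), pvG]

-- ===== VERDICT (by name: the statement is the Claim_ definition above) =====
theorem mark_sources_spec : Claim_equal_mark_sources := by
  intro s_list _ _
  unfold Spec_mark_sources
  cases s_list with
  | nil => rfl
  | cons h t =>
    simp only [mark_sources, mark_sources_alt]
    rw [pv_fold_eq_g, pvLoop_eq (h :: t) ((h :: t).length + 1) 1 (by omega)]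
    simp
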